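-- pv_equiv track=rewrite | github.com/SigOiry/ICE_CREAMS_STUDIO | ice_creams_model_families.py | spectral_cnn_uses_standardized_reflectance
-- ===== SOURCE A (Python) =====
-- from typing import Any, Iterable
--
-- def _normalise_name_list(values: Iterable[Any] | None) -> list[str]:
--     """Normalize and de-duplicate string values while preserving order."""
--     normalized: list[str] = []
--     seen: set[str] = set()
--     for value in values or []:
--         item = str(value).strip()
--         if item and item not in seen:
--             seen.add(item)
--             normalized.append(item)
--     return normalized
--
-- def spectral_cnn_uses_standardized_reflectance(
--     sequence_channel_feature_names: Any | None = None,
--     sequence_feature_names: Iterable[Any] | None = None,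
-- ) -> bool:
--     """Return True when spectral CNN inputs include standardized reflectance."""
--     channel_groups = _normalize_sequence_channel_feature_names(sequence_channel_feature_names)
--     if channel_groups:
--         return any(
--             feature_name.startswith("Reflectance_Stan_")
--             for channel_group in channel_groups
--             for feature_name in channel_group
--         )
--
--     ordered_feature_names = _normalise_name_list(sequence_feature_names)
--     return any(feature_name.startswith("Reflectance_Stan_") for feature_name in ordered_feature_names)
--
-- def _normalize_sequence_channel_feature_names(value: Any) -> list[list[str]]:
--     """Normalize nested sequence channel feature names while preserving order."""
--     normalized_groups: list[list[str]] = []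
--     for group in value or []:
--         normalized_group = _normalise_name_list(group)
--         if normalized_group:
--             normalized_groups.append(normalized_group)
--     return normalized_groups
-- ===== SOURCE B (Python) =====
-- def spectral_cnn_uses_standardized_reflectance(
--     sequence_channel_feature_names=None,
--     sequence_feature_names=None,
-- ):
--     """One accumulator pass over raw channel values (two flags tracked at once),
--     no normalization/dedup lists and no separate non-emptiness pre-scan."""
--     prefix = "Reflectance_Stan_"
--     has_channel = False
--     channel_hit = False
--     for group in (sequence_channel_feature_names or []):
--         for value in (group or []):
--             stripped = str(value).strip()
--             if stripped:
--                 has_channel = True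
--                 channel_hit = channel_hit or stripped.startswith(prefix)
--     if has_channel:
--         return channel_hit
--     seq_hit = False
--     for value in (sequence_feature_names or []):
--         seq_hit = seq_hit or str(value).strip().startswith(prefix)
--     return seq_hit
-- ===== Notes on version B (the rewrite author's own statement) =====
-- stated objective: alternative
-- what changed: Replaced A's staged normalize-dedup-then-branch-then-any pipeline by one accumulator pass over the raw channel values that tracks two flags (saw-non-blank, prefix-hit) simultaneously, falling back to a single accumulator fold over the flat names; no intermediate lists, sets, or pre-scan for non-emptiness are built.
import Mathlib
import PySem

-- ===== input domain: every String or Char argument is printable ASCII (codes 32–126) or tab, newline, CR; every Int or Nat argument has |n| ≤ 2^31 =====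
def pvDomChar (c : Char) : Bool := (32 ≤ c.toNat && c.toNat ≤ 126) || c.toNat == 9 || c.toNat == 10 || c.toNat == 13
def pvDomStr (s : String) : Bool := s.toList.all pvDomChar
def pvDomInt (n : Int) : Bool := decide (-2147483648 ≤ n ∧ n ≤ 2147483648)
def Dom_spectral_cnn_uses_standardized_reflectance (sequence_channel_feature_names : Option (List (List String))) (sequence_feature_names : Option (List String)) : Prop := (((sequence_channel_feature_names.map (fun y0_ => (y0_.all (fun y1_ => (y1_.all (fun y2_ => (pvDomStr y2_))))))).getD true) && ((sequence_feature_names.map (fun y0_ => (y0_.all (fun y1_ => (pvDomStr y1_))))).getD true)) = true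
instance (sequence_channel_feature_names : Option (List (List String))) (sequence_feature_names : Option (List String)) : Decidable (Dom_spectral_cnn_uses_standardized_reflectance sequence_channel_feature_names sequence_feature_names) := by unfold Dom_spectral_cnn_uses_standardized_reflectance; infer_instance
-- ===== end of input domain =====

-- B replaces A's normalize/dedup-then-branch staging by one accumulator pass tracking two
-- flags at once over the raw channel values (objective: alternative decomposition).


-- ===== PORT A =====
-- one step of _normalise_name_list's loop body
def pvNormStep (st : List String × PySem.Set String) (value : String) : List String × PySem.Set String :=
  let item := PySem.Str.strip value
  if item != "" && !(PySem.Set.contains st.2 item) then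
    (st.1 ++ [item], PySem.Set.add st.2 item)
  else st

def pvNormaliseNameList (values : List String) : List String :=
  (values.foldl pvNormStep ([], PySem.Set.empty)).1

def pvNormalizeChannelGroups (value : Option (List (List String))) : List (List String) :=
  (value.getD []).foldl
    (fun acc group =>
      let ng := pvNormaliseNameList group
      if !ng.isEmpty then acc ++ [ng] else acc) []

def spectral_cnn_uses_standardized_reflectance (sequence_channel_feature_names : Option (List (List String))) (sequence_feature_names : Option (List String)) : Bool :=
  let channel_groups := pvNormalizeChannelGroups sequence_channel_feature_names
  if !channel_groups.isEmpty then
    channel_groups.any (fun g => g.any (fun f => PySem.Str.startswith f "Reflectance_Stan_"))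
  else
    (pvNormaliseNameList (sequence_feature_names.getD [])).any
      (fun f => PySem.Str.startswith f "Reflectance_Stan_")

-- ===== PORT B =====
-- inner loop body of B's channel pass: st = (has_channel, channel_hit)
def pvChanStep (st : Bool × Bool) (value : String) : Bool × Bool :=
  let stripped := PySem.Str.strip value
  if stripped ≠ "" then (true, st.2 || PySem.Str.startswith stripped "Reflectance_Stan_") else st

def spectral_cnn_uses_standardized_reflectance_alt (sequence_channel_feature_names : Option (List (List String))) (sequence_feature_names : Option (List String)) : Bool :=
  let st := (sequence_channel_feature_names.getD []).foldl
    (fun st group => group.foldl pvChanStep st) (false, false)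
  if st.1 then st.2
  else (sequence_feature_names.getD []).foldl
    (fun hit v => hit || PySem.Str.startswith (PySem.Str.strip v) "Reflectance_Stan_") false

-- ===== PRECONDITION & SPEC =====
def Spec_spectral_cnn_uses_standardized_reflectance (sequence_channel_feature_names : Option (List (List String))) (sequence_feature_names : Option (List String)) (out : Bool) : Prop := out = spectral_cnn_uses_standardized_reflectance_alt sequence_channel_feature_names sequence_feature_names
instance (sequence_channel_feature_names : Option (List (List String))) (sequence_feature_names : Option (List String)) (out : Bool) : Decidable (Spec_spectral_cnn_uses_standardized_reflectance sequence_channel_feature_names sequence_feature_names out) := by unfold Spec_spectral_cnn_uses_standardized_reflectance; infer_instance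

-- ===== CLAIM (what is proved, stated in full; the proofs are below) =====
def Claim_equal_spectral_cnn_uses_standardized_reflectance : Prop := ∀ (sequence_channel_feature_names : Option (List (List String))) (sequence_feature_names : Option (List String)), Dom_spectral_cnn_uses_standardized_reflectance sequence_channel_feature_names sequence_feature_names → Spec_spectral_cnn_uses_standardized_reflectance sequence_channel_feature_names sequence_feature_names (spectral_cnn_uses_standardized_reflectance sequence_channel_feature_names sequence_feature_names)

-- ===== LEMMAS AND PROOFS =====

-- the loop body of _normalise_name_list, in Prop-conditional form
theorem pvNormStep_eq (st : List String × PySem.Set String) (v : String) :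
    pvNormStep st v
      = if PySem.Str.strip v ≠ "" ∧ PySem.Str.strip v ∉ st.2 then
          (st.1 ++ [PySem.Str.strip v], st.2 ++ [PySem.Str.strip v])
        else st := by
  simp only [pvNormStep, PySem.Set.add]
  split_ifs with h1 h2 h3 <;> simp_all

-- any over the normalise fold: de-duplication does not change `any p` when p "" = false
theorem pvNormFoldAny (p : String → Bool) (hp : p "" = false) :
    ∀ (l : List String) (norm : List String) (seen : PySem.Set String),
      (∀ x, x ∈ seen → x ∈ norm) →
      ((l.foldl pvNormStep (norm, seen)).1).any p
        = (norm.any p || l.any (fun v => p (PySem.Str.strip v))) := by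
  intro l
  induction l with
  | nil => intro norm seen _; simp
  | cons v l ih =>
    intro norm seen hinv
    simp only [List.foldl_cons, List.any_cons]
    rw [pvNormStep_eq]
    by_cases hc : PySem.Str.strip v ≠ "" ∧ PySem.Str.strip v ∉ seen
    · rw [if_pos hc]
      rw [ih]
      · simp [Bool.or_assoc, Bool.or_comm]
      · intro x hx
        rcases List.mem_append.mp hx with h | h
        · exact List.mem_append_left _ (hinv x h)
        · exact List.mem_append_right _ h
    · rw [if_neg hc]
      rw [ih _ _ hinv]
      by_cases hpv : p (PySem.Str.strip v) = true
      · have hne : PySem.Str.strip v ≠ "" := by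
          intro h; rw [h, hp] at hpv; exact Bool.false_ne_true hpv
        have hmem : PySem.Str.strip v ∈ seen := by
          by_contra hm; exact hc ⟨hne, hm⟩
        have : norm.any p = true := List.any_eq_true.mpr ⟨_, hinv _ hmem, hpv⟩
        simp [this, hpv]
      · simp [Bool.not_eq_true] at hpv
        simp [hpv]

-- every element produced by the normalise fold is a non-empty string
theorem pvNormFoldNe :
    ∀ (l : List String) (norm : List String) (seen : PySem.Set String),
      (∀ x ∈ norm, x ≠ "") →
      ∀ x ∈ (l.foldl pvNormStep (norm, seen)).1, x ≠ "" := by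
  intro l
  induction l with
  | nil => intro norm seen h; simpa using h
  | cons v l ih =>
    intro norm seen h
    simp only [List.foldl_cons]
    rw [pvNormStep_eq]
    by_cases hc : PySem.Str.strip v ≠ "" ∧ PySem.Str.strip v ∉ seen
    · rw [if_pos hc]
      apply ih
      intro x hx
      rcases List.mem_append.mp hx with h' | h'
      · exact h x h'
      · simp at h'; rw [h']; exact hc.1
    · rw [if_neg hc]; exact ih _ _ h

theorem pvNormAny (p : String → Bool) (hp : p "" = false) (l : List String) :
    (pvNormaliseNameList l).any p = l.any (fun v => p (PySem.Str.strip v)) := by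
  have := pvNormFoldAny p hp l [] PySem.Set.empty (by simp [PySem.Set.empty])
  simpa [pvNormaliseNameList] using this

theorem pvNormNonEmpty (l : List String) :
    (!(pvNormaliseNameList l).isEmpty) = l.any (fun v => PySem.Str.strip v != "") := by
  have hne : ∀ x ∈ pvNormaliseNameList l, x ≠ "" :=
    pvNormFoldNe l [] PySem.Set.empty (by simp)
  have hany := pvNormAny (fun v => v != "") (by simp) l
  rw [← hany]
  cases hres : pvNormaliseNameList l with
  | nil => simp
  | cons x xs =>
    have hx : x ≠ "" := by
      apply hne; rw [hres]; exact List.mem_cons_self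
    simp [hx]

-- any over the group fold
theorem pvGroupsFoldAny (q : List String → Bool) (hq : q [] = false) :
    ∀ (l : List (List String)) (acc : List (List String)),
      (l.foldl (fun acc group =>
          let ng := pvNormaliseNameList group
          if !ng.isEmpty then acc ++ [ng] else acc) acc).any q
        = (acc.any q || l.any (fun g => q (pvNormaliseNameList g))) := by
  intro l
  induction l with
  | nil => intro acc; simp
  | cons g l ih =>
    intro acc
    simp only [List.foldl_cons, List.any_cons]
    by_cases hg : (!(pvNormaliseNameList g).isEmpty) = true
    · simp only [hg, if_pos]
      rw [ih]
      simp [Bool.or_assoc]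
    · have hnil : pvNormaliseNameList g = [] := by simpa using hg
      simp only [hg]
      rw [if_neg (by simp)]
      rw [ih, hnil, hq]
      simp

-- A's result, characterised by `any` over the raw input
theorem spectral_A_char (scfn : Option (List (List String))) (sfn : Option (List String)) :
    spectral_cnn_uses_standardized_reflectance scfn sfn
      = (if (scfn.getD []).any (fun g => g.any (fun v => PySem.Str.strip v != "")) then
          (scfn.getD []).any
            (fun g => g.any (fun v => PySem.Str.startswith (PySem.Str.strip v) "Reflectance_Stan_"))
        else
          (sfn.getD []).any
            (fun v => PySem.Str.startswith (PySem.Str.strip v) "Reflectance_Stan_")) := by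
  have hpfx : PySem.Str.startswith "" "Reflectance_Stan_" = false := by decide
  have hmem : ∀ g ∈ pvNormalizeChannelGroups scfn, g ≠ [] := by
    unfold pvNormalizeChannelGroups
    generalize (scfn.getD []) = l
    induction l using List.reverseRecOn with
    | nil => simp
    | append_singleton l g ih =>
      simp only [List.foldl_append, List.foldl_cons, List.foldl_nil]
      intro x hx
      by_cases hg : (!(pvNormaliseNameList g).isEmpty) = true
      · rw [if_pos hg] at hx
        rcases List.mem_append.mp hx with h | h
        · exact ih x h
        · simp at h; rw [h]
          intro hcontra
          rw [hcontra] at hg; simp at hg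
      · rw [if_neg hg] at hx; exact ih x hx
  have hcond : (!(pvNormalizeChannelGroups scfn).isEmpty)
      = (scfn.getD []).any (fun g => g.any (fun v => PySem.Str.strip v != "")) := by
    have h1 : (!(pvNormalizeChannelGroups scfn).isEmpty)
        = (pvNormalizeChannelGroups scfn).any (fun g => !g.isEmpty) := by
      cases hres : pvNormalizeChannelGroups scfn with
      | nil => simp
      | cons x xs =>
        have hx : x ≠ [] := by apply hmem; rw [hres]; exact List.mem_cons_self
        simp [hx]
    rw [h1]
    have h2 := pvGroupsFoldAny (fun g => !g.isEmpty) (by simp) (scfn.getD []) []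
    unfold pvNormalizeChannelGroups
    rw [h2]
    simp only [List.any_nil, Bool.false_or]
    rw [show (fun g => !(pvNormaliseNameList g).isEmpty)
          = (fun g : List String => g.any (fun v => PySem.Str.strip v != "")) from
        funext pvNormNonEmpty]
  have hbranch : (pvNormalizeChannelGroups scfn).any
        (fun g => g.any (fun f => PySem.Str.startswith f "Reflectance_Stan_"))
      = (scfn.getD []).any
        (fun g => g.any (fun v => PySem.Str.startswith (PySem.Str.strip v) "Reflectance_Stan_")) := by
    have h2 := pvGroupsFoldAny
      (fun g => g.any (fun f => PySem.Str.startswith f "Reflectance_Stan_")) (by simp)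
      (scfn.getD []) []
    unfold pvNormalizeChannelGroups
    rw [h2]
    simp only [List.any_nil, Bool.false_or]
    rw [show (fun g => (pvNormaliseNameList g).any (fun f => PySem.Str.startswith f "Reflectance_Stan_"))
          = (fun g : List String => g.any (fun v => PySem.Str.startswith (PySem.Str.strip v) "Reflectance_Stan_")) from
        funext (fun g => pvNormAny (fun f => PySem.Str.startswith f "Reflectance_Stan_") hpfx g)]
  have hseq : (pvNormaliseNameList (sfn.getD [])).any
        (fun f => PySem.Str.startswith f "Reflectance_Stan_")
      = (sfn.getD []).any (fun v => PySem.Str.startswith (PySem.Str.strip v) "Reflectance_Stan_") :=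
    pvNormAny _ hpfx _
  unfold spectral_cnn_uses_standardized_reflectance
  simp only
  rw [hcond, hbranch, hseq]

-- B's inner channel fold computes the two `any`s
theorem pvChanFold (l : List String) (st : Bool × Bool) :
    l.foldl pvChanStep st
      = (st.1 || l.any (fun v => PySem.Str.strip v != ""),
         st.2 || l.any (fun v => PySem.Str.startswith (PySem.Str.strip v) "Reflectance_Stan_")) := by
  induction l generalizing st with
  | nil => simp
  | cons v l ih =>
    simp only [List.foldl_cons, List.any_cons]
    rw [ih]
    unfold pvChanStep
    by_cases hv : PySem.Str.strip v ≠ ""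
    · rw [if_pos hv]
      simp [hv, Bool.or_assoc]
    · rw [if_neg hv]
      push_neg at hv
      have hsw : PySem.Str.startswith (PySem.Str.strip v) "Reflectance_Stan_" = false := by
        rw [hv]; decide
      rw [hsw]
      simp [hv]

-- B's outer channel fold
theorem pvChanGroupsFold (gs : List (List String)) (st : Bool × Bool) :
    gs.foldl (fun st group => group.foldl pvChanStep st) st
      = (st.1 || gs.any (fun g => g.any (fun v => PySem.Str.strip v != "")),
         st.2 || gs.any (fun g => g.any (fun v => PySem.Str.startswith (PySem.Str.strip v) "Reflectance_Stan_"))) := by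
  induction gs generalizing st with
  | nil => simp
  | cons g gs ih =>
    simp only [List.foldl_cons, List.any_cons]
    rw [pvChanFold, ih]
    simp [Bool.or_assoc]

-- B's sequence fold is `any`
theorem pvSeqFold (p : String → Bool) (l : List String) (b : Bool) :
    l.foldl (fun hit v => hit || p v) b = (b || l.any p) := by
  induction l generalizing b with
  | nil => simp
  | cons v l ih => simp [ih, Bool.or_assoc]

theorem spectral_cnn_spec_aux (scfn : Option (List (List String))) (sfn : Option (List String)) :
    spectral_cnn_uses_standardized_reflectance scfn sfn
      = spectral_cnn_uses_standardized_reflectance_alt scfn sfn := by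
  rw [spectral_A_char]
  unfold spectral_cnn_uses_standardized_reflectance_alt
  simp only
  rw [pvChanGroupsFold, pvSeqFold]
  simp

-- ===== VERDICT (by name: the statement is the Claim_ definition above) =====
theorem spectral_cnn_uses_standardized_reflectance_spec : Claim_equal_spectral_cnn_uses_standardized_reflectance := by
  intro scfn sfn _
  unfold Spec_spectral_cnn_uses_standardized_reflectance
  exact spectral_cnn_spec_aux scfn sfn
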